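-- pv_equiv track=rewrite | github.com/Ninja-kitten/CompEconProj1 | reserve_auction.py | auction_result
-- ===== SOURCE A (Python) =====
-- def auction_result(bidders_list, start_price, reserve_price,increment):
--     auction_winner = sorted(bidders_list)[-1]
--     auction_loser = sorted(bidders_list)[-2]
--
--     if auction_winner < reserve_price:
--         return 0
--     else:
--         revenue = 0
--         while revenue < auction_loser or revenue < reserve_price:
--             if revenue + increment > auction_winner:
--                 break
--             else:
--                 revenue += increment
--         return revenue
-- ===== SOURCE B (Python) =====
-- def auction_result(bidders_list, start_price, reserve_price, increment):
--     # single pass for the top two bids, then closed-form arithmetic (no sort, no loop)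
--     a = b = None
--     for x in bidders_list:
--         if a is None or x > a:
--             a, b = x, a
--         elif b is None or x > b:
--             b = x
--     if a < reserve_price:
--         return 0
--     target = b if b > reserve_price else reserve_price
--     k1 = -((-target) // increment)   # ceil(target / increment)
--     if k1 < 0:
--         k1 = 0
--     k2 = a // increment              # floor(winner / increment)
--     if k2 < 0:
--         k2 = 0
--     return increment * (k1 if k1 < k2 else k2)
-- ===== Notes on version B (the rewrite author's own statement) =====
-- stated objective: faster
-- what changed: B finds the top two bids in one pass (no sorting) and replaces A's increment-by-increment while-loop with closed-form ceiling/floor division, so the revenue is computed arithmetically instead of by up to winner/increment iterations.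
-- outside the precondition, e.g. on auction_result([-3, -1], 0, -2, 0): A returns 0, B raises ZeroDivisionError; on auction_result([-5, -3], 0, -10, -1): A returns 0, B returns -3
import Mathlib
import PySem

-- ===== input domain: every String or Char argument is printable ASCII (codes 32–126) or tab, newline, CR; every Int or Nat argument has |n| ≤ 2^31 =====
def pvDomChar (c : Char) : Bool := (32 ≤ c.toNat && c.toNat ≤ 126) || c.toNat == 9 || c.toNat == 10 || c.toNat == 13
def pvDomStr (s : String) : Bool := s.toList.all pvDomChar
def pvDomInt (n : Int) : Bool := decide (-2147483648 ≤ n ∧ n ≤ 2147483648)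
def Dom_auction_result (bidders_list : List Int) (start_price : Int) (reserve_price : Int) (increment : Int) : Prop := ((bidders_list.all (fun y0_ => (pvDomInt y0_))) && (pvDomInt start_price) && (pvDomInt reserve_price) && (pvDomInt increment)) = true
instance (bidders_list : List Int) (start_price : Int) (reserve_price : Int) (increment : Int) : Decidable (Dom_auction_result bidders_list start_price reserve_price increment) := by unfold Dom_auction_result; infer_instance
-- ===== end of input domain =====

-- B replaces A's sort + increment-by-increment while-loop with a single top-two pass and
-- closed-form ceiling/floor division (objective: faster).

-- ===== PORT A =====
-- the while-loop, with fuel (Python's loop has no bound; under Pre_ the fuel chosen below suffices)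
def auctionLoop (auction_loser reserve_price auction_winner increment : Int) : Nat → Int → Int
  | 0, revenue => revenue
  | fuel + 1, revenue =>
    if revenue < auction_loser ∨ revenue < reserve_price then
      if revenue + increment > auction_winner then revenue
      else auctionLoop auction_loser reserve_price auction_winner increment fuel (revenue + increment)
    else revenue

def auction_result (bidders_list : List Int) (start_price : Int) (reserve_price : Int) (increment : Int) : Int :=
  match PySem.List.pyGet? (PySem.List.sorted bidders_list (fun x => x) false) (-1),
        PySem.List.pyGet? (PySem.List.sorted bidders_list (fun x => x) false) (-2) with
  | some auction_winner, some auction_loser =>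
    if auction_winner < reserve_price then 0
    else auctionLoop auction_loser reserve_price auction_winner increment
           ((max auction_loser reserve_price).toNat + 1) 0
  | _, _ => 0   -- IndexError in Python (fewer than two bidders): outside Pre_
  
-- ===== PORT B =====
-- one step of Source B's top-two loop
def topTwoStep (ab : Option Int × Option Int) (x : Int) : Option Int × Option Int :=
  match ab with
  | (none, _) => (some x, none)
  | (some a, b) =>
    if x > a then (some x, some a)
    else match b with
      | none => (some a, some x)
      | some bv => if x > bv then (some a, some x) else (some a, some bv)

def auction_result_alt (bidders_list : List Int) (start_price : Int) (reserve_price : Int) (increment : Int) : Int :=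
  match bidders_list.foldl topTwoStep (none, none) with
  | (some a, some b) =>
    if a < reserve_price then 0
    else
      let target := if b > reserve_price then b else reserve_price
      let k1 := -(PySem.Int.floordiv (-target) increment)
      let k1 := if k1 < 0 then 0 else k1
      let k2 := PySem.Int.floordiv a increment
      let k2 := if k2 < 0 then 0 else k2
      increment * (if k1 < k2 then k1 else k2)
  | (some _, none) => 0   -- TypeError in Python (fewer than two bidders): outside Pre_
  | (none, _) => 0        -- TypeError in Python (empty list): outside Pre_

-- ===== PRECONDITION & SPEC =====
-- Pre_ excludes lists with fewer than two bidders (A raises IndexError) and, when some bid meets the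
-- reserve, non-positive increments (A then either loops forever or returns 0 from an immediate exit
-- that only its step-by-step loop produces); with every bid below the reserve any increment is admitted.
def Pre_auction_result (bidders_list : List Int) (start_price : Int) (reserve_price : Int) (increment : Int) : Prop :=
  2 ≤ bidders_list.length ∧ (0 < increment ∨ ∀ x ∈ bidders_list, x < reserve_price)
instance (bidders_list : List Int) (start_price : Int) (reserve_price : Int) (increment : Int) : Decidable (Pre_auction_result bidders_list start_price reserve_price increment) := by unfold Pre_auction_result; infer_instance

def pvWitness_auction_result : List Int × Int × Int × Int := ([3, 7], 0, 2, 2)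

def Spec_auction_result (bidders_list : List Int) (start_price : Int) (reserve_price : Int) (increment : Int) (out : Int) : Prop := out = auction_result_alt bidders_list start_price reserve_price increment
instance (bidders_list : List Int) (start_price : Int) (reserve_price : Int) (increment : Int) (out : Int) : Decidable (Spec_auction_result bidders_list start_price reserve_price increment out) := by unfold Spec_auction_result; infer_instance

-- ===== CLAIM (what is proved, stated in full; the proofs are below) =====
def Claim_equal_auction_result : Prop := ∀ (bidders_list : List Int) (start_price : Int) (reserve_price : Int) (increment : Int), Dom_auction_result bidders_list start_price reserve_price increment → Pre_auction_result bidders_list start_price reserve_price increment → Spec_auction_result bidders_list start_price reserve_price increment (auction_result bidders_list start_price reserve_price increment)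

-- ===== LEMMAS AND PROOFS =====

-- "w is the maximum of l and v the maximum of l with one copy of w removed"
def Top2 (l : List Int) (w v : Int) : Prop :=
  w ∈ l ∧ (∀ x ∈ l, x ≤ w) ∧ v ∈ l.erase w ∧ (∀ x ∈ l.erase w, x ≤ v)

theorem Top2_unique {l : List Int} {w1 v1 w2 v2 : Int}
    (h1 : Top2 l w1 v1) (h2 : Top2 l w2 v2) : w1 = w2 ∧ v1 = v2 := by
  obtain ⟨hw1, hb1, hv1, hc1⟩ := h1
  obtain ⟨hw2, hb2, hv2, hc2⟩ := h2
  have hw : w1 = w2 := le_antisymm (hb2 _ hw1) (hb1 _ hw2)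
  subst hw
  exact ⟨rfl, le_antisymm (hc2 _ hv1) (hc1 _ hv2)⟩

theorem Top2_perm {l l' : List Int} {w v : Int} (hp : l.Perm l') (h : Top2 l w v) :
    Top2 l' w v := by
  obtain ⟨hw, hb, hv, hc⟩ := h
  exact ⟨hp.mem_iff.mp hw, fun x hx => hb x (hp.mem_iff.mpr hx),
    (hp.erase w).mem_iff.mp hv, fun x hx => hc x ((hp.erase w).mem_iff.mpr hx)⟩

theorem Top2_cons {l : List Int} {w v y : Int} (h : Top2 l w v) (hy : y ≤ v) :
    Top2 (y :: l) w v := by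
  obtain ⟨hw, hb, hv, hc⟩ := h
  have hvw : v ≤ w := hb v (List.mem_of_mem_erase hv)
  unfold Top2
  by_cases hyw : y = w
  · subst hyw
    rw [List.erase_cons_head]
    refine ⟨List.mem_cons_self, ?_, List.mem_of_mem_erase hv, fun x hx => ?_⟩
    · intro x hx; rcases List.mem_cons.mp hx with h | h
      · omega
      · exact hb x h
    · have := hb x hx; omega
  · rw [List.erase_cons_tail (by simpa using hyw)]
    refine ⟨List.mem_cons_of_mem _ hw, fun x hx => ?_, List.mem_cons_of_mem _ hv, fun x hx => ?_⟩
    · rcases List.mem_cons.mp hx with h | h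
      · omega
      · exact hb x h
    · rcases List.mem_cons.mp hx with h | h
      · omega
      · exact hc x h

-- from Top2 of a list with at least two named heads, one of them is ≤ v
theorem Top2_min_le {c d : Int} {l : List Int} {w v : Int} (h : Top2 (c :: d :: l) w v) :
    c ≤ v ∨ d ≤ v := by
  obtain ⟨hw, hb, hv, hc⟩ := h
  by_cases hcw : c = w
  · subst hcw
    rw [List.erase_cons_head] at hc
    exact Or.inr (hc d List.mem_cons_self)
  · rw [List.erase_cons_tail (by simpa using hcw)] at hc
    exact Or.inl (hc c List.mem_cons_self)

-- invariant of Source B's top-two fold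
theorem foldl_topTwo (t : List Int) : ∀ a b : Int, b ≤ a →
    ∃ w v, t.foldl topTwoStep (some a, some b) = (some w, some v) ∧ Top2 (a :: b :: t) w v := by
  induction t with
  | nil =>
    intro a b hba
    refine ⟨a, b, rfl, List.mem_cons_self, ?_, ?_, ?_⟩
    · intro x hx; rcases List.mem_cons.mp hx with h | h
      · omega
      · simp at h; omega
    · rw [List.erase_cons_head]; exact List.mem_cons_self
    · rw [List.erase_cons_head]; intro x hx; simp at hx; omega
  | cons x t ih =>
    intro a b hba
    by_cases hxa : x > a
    · obtain ⟨w, v, heq, htop⟩ := ih x a (by omega)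
      refine ⟨w, v, ?_, ?_⟩
      · simpa [topTwoStep, hxa] using heq
      · have hbv : b ≤ v := by
          have := Top2_min_le htop
          obtain ⟨_, hb2, _, _⟩ := htop
          have hxw := hb2 x List.mem_cons_self
          have haw := hb2 a (List.mem_cons_of_mem _ List.mem_cons_self)
          omega
        exact Top2_perm (((List.Perm.swap a x t).cons b).trans (List.Perm.swap a b (x :: t)))
          (Top2_cons htop hbv)
    · by_cases hxb : x > b
      · obtain ⟨w, v, heq, htop⟩ := ih a x (by omega)
        refine ⟨w, v, ?_, ?_⟩
        · simpa [topTwoStep, hxa, hxb] using heq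
        · have hbv : b ≤ v := by
            rcases Top2_min_le htop with h | h
            · omega
            · omega
          exact Top2_perm (List.Perm.swap a b (x :: t)) (Top2_cons htop hbv)
      · obtain ⟨w, v, heq, htop⟩ := ih a b hba
        refine ⟨w, v, ?_, ?_⟩
        · simpa [topTwoStep, hxa, hxb] using heq
        · have hxv : x ≤ v := by
            rcases Top2_min_le htop with h | h <;> omega
          exact Top2_perm ((List.Perm.swap a x (b :: t)).trans ((List.Perm.swap b x t).cons a))
            (Top2_cons htop hxv)
  
-- the sorted list's last two elements are Top2
theorem sorted_top2 (l : List Int) (h2 : 2 ≤ l.length) :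
    ∃ w v, PySem.List.pyGet? (PySem.List.sorted l (fun x => x) false) (-1) = some w ∧
      PySem.List.pyGet? (PySem.List.sorted l (fun x => x) false) (-2) = some v ∧
      Top2 l w v := by
  set s := PySem.List.sorted l (fun x => x) false with hs
  have hlen : s.length = l.length := PySem.List.length_sorted l (fun x => x) false
  have hn : 2 ≤ s.length := by omega
  have h1n : s.length - 1 < s.length := by omega
  have h2n : s.length - 2 < s.length := by omega
  refine ⟨s[s.length - 1], s[s.length - 2], ?_, ?_, ?_⟩
  · rw [PySem.List.pyGet?_neg_ofNat s 1 (by omega) (by omega)]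
    exact List.getElem?_eq_getElem h1n
  · rw [PySem.List.pyGet?_neg_ofNat s 2 (by omega) (by omega)]
    exact List.getElem?_eq_getElem h2n
  -- Top2 s, then transfer along the permutation
  have hperm : s.Perm l := PySem.List.sorted_perm l (fun x => x) false
  have hmax : ∀ x ∈ s, x ≤ s[s.length - 1] := by
    intro x hx
    obtain ⟨i, hi, rfl⟩ := List.mem_iff_getElem.mp hx
    exact PySem.List.sorted_id_getElem_mono l (by omega) h1n
  have hne : s ≠ [] := by intro h; simp [h] at hn
  have hdl : s.dropLast ++ [s[s.length - 1]] = s := by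
    have := List.dropLast_append_getLast hne
    rwa [List.getLast_eq_getElem] at this
  have hed : (s.erase s[s.length - 1]).Perm s.dropLast := by
    refine List.Perm.cons_inv (a := s[s.length - 1]) ?_
    refine ((List.perm_cons_erase (List.getElem_mem h1n)).symm.trans ?_)
    conv_lhs => rw [← hdl]
    exact List.perm_append_singleton _ _
  have hdlen : s.dropLast.length = s.length - 1 := List.length_dropLast
  have hv_mem : s[s.length - 2] ∈ s.dropLast := by
    have h2d : s.length - 2 < s.dropLast.length := by omega
    have := List.getElem_dropLast h2d
    rw [← this]
    exact List.getElem_mem h2d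
  have hsnd : ∀ x ∈ s.dropLast, x ≤ s[s.length - 2] := by
    intro x hx
    obtain ⟨i, hi, rfl⟩ := List.mem_iff_getElem.mp hx
    rw [List.getElem_dropLast hi]
    exact PySem.List.sorted_id_getElem_mono l (by omega) h2n
  have htop : Top2 s s[s.length - 1] s[s.length - 2] := by
    refine ⟨List.getElem_mem h1n, hmax, ?_, ?_⟩
    · exact hed.symm.mem_iff.mp hv_mem
    · intro x hx; exact hsnd x (hed.mem_iff.mp hx)
  -- transfer
  obtain ⟨hw, hb, hv, hc⟩ := htop
  exact ⟨hperm.mem_iff.mp hw, fun x hx => hb x (hperm.mem_iff.mpr hx),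
    (hperm.erase _).mem_iff.mp hv, fun x hx => hc x ((hperm.erase _).mem_iff.mpr hx)⟩

-- closed form of A's while-loop (0 < inc); T = max loser reserve, M = number of increments taken
theorem auctionLoop_closed (loser reserve winner inc : Int) (hinc : 0 < inc) :
    ∀ (fuel : Nat) (j : Int), 0 ≤ j →
      j ≤ max 0 (min (-(PySem.Int.floordiv (-(max loser reserve)) inc)) (PySem.Int.floordiv winner inc)) →
      ((max 0 (min (-(PySem.Int.floordiv (-(max loser reserve)) inc)) (PySem.Int.floordiv winner inc)) - j).toNat < fuel) →
      auctionLoop loser reserve winner inc fuel (j * inc) =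
        inc * max 0 (min (-(PySem.Int.floordiv (-(max loser reserve)) inc)) (PySem.Int.floordiv winner inc)) := by
  set kc := -(PySem.Int.floordiv (-(max loser reserve)) inc) with hkc
  set kf := PySem.Int.floordiv winner inc with hkf
  have hcond : ∀ j : Int, (j * inc < loser ∨ j * inc < reserve) ↔ j < kc := by
    intro j
    have h1 := PySem.Int.floordiv_lt_iff_lt_mul (a := -(max loser reserve)) (b := inc) (q := -j) hinc
    rw [← lt_max_iff]
    constructor
    · intro h
      have h2 : -(max loser reserve) < -j * inc := by linarith
      have := h1.mpr h2
      omega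
    · intro h
      have h2 : PySem.Int.floordiv (-(max loser reserve)) inc < -j := by omega
      have := h1.mp h2
      linarith
  have hbrk : ∀ j : Int, (j * inc + inc > winner) ↔ kf ≤ j := by
    intro j
    have h1 := PySem.Int.le_floordiv_iff_mul_le (a := winner) (b := inc) (q := j + 1) hinc
    constructor
    · intro h
      by_contra hcon
      have : j + 1 ≤ kf := by omega
      have := h1.mp this
      linarith
    · intro h
      by_contra hcon
      have : (j + 1) * inc ≤ winner := by linarith
      have := h1.mpr this
      omega
  intro fuel
  induction fuel with
  | zero => intro j h0 hjM hf; omega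
  | succ fuel ih =>
    intro j h0 hjM hf
    rw [auctionLoop]
    by_cases hc : j < kc
    · rw [if_pos ((hcond j).mpr hc)]
      by_cases hb : kf ≤ j
      · rw [if_pos ((hbrk j).mpr hb)]
        have hj : j = max 0 (min kc kf) := by omega
        rw [hj, Int.mul_comm]
      · rw [if_neg (fun h => hb ((hbrk j).mp h))]
        have hstep : j * inc + inc = (j + 1) * inc := by ring
        rw [hstep]
        exact ih (j + 1) (by omega) (by omega) (by omega)
    · rw [if_neg (fun h => hc ((hcond j).mp h))]
      have hj : j = max 0 (min kc kf) := by omega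
      rw [hj, Int.mul_comm]

-- ===== VERDICT (by name: the statement is the Claim_ definition above) =====
theorem auction_result_spec : Claim_equal_auction_result := by
  intro l sp r inc _hdom hpre
  obtain ⟨h2, hor⟩ := hpre
  unfold Spec_auction_result
  obtain ⟨w, v, hg1, hg2, htop⟩ := sorted_top2 l h2
  match l, h2 with
  | x :: y :: t, _ =>
  -- B's fold computes the same top two, by uniqueness of Top2
  have hfoldB : (x :: y :: t).foldl topTwoStep (none, none) = (some w, some v) := by
    by_cases hyx : y > x
    · obtain ⟨w', v', heq, htop'⟩ := foldl_topTwo t y x (by omega)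
      have htop2 : Top2 (x :: y :: t) w' v' := Top2_perm (List.Perm.swap x y t) htop'
      obtain ⟨hw, hv⟩ := Top2_unique htop htop2
      rw [hw, hv]
      simpa [List.foldl, topTwoStep, hyx] using heq
    · obtain ⟨w', v', heq, htop'⟩ := foldl_topTwo t x y (by omega)
      obtain ⟨hw, hv⟩ := Top2_unique htop htop'
      rw [hw, hv]
      simpa [List.foldl, topTwoStep, hyx] using heq
  have hA : auction_result (x :: y :: t) sp r inc =
      if w < r then 0 else auctionLoop v r w inc ((max v r).toNat + 1) 0 := by
    unfold auction_result
    rw [hg1, hg2]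
  rw [hA]
  unfold auction_result_alt
  rw [hfoldB]
  by_cases hwr : w < r
  · simp [hwr]
  · simp only [if_neg hwr]
    have hinc : 0 < inc := by
      rcases hor with h | h
      · exact h
      · exact absurd (h w htop.1) (by omega)
    have hT : (if v > r then v else r) = max v r := by split_ifs <;> omega
    rw [hT]
    set kc := -(PySem.Int.floordiv (-(max v r)) inc) with hkc
    set kf := PySem.Int.floordiv w inc with hkf
    -- the number of increments A's loop performs never exceeds (max v r).toNat
    have hkcb : kc ≤ max 0 (max v r) := by
      have h1 := PySem.Int.le_floordiv_iff_mul_le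
        (a := -(max v r)) (b := inc) (q := -(max 0 (max v r))) hinc
      have h2 : max v r ≤ max 0 (max v r) * inc := by
        rcases le_or_gt (max v r) 0 with h | h
        · have : max 0 (max v r) = 0 := by omega
          rw [this]; simpa using h
        · have heq : max 0 (max v r) = max v r := by omega
          rw [heq]; nlinarith
      have := h1.mpr (by linarith)
      omega
    have hM := auctionLoop_closed v r w inc hinc ((max v r).toNat + 1) 0 le_rfl
      (le_max_left 0 _) (by omega)
    have hM' : auctionLoop v r w inc ((max v r).toNat + 1) 0 =
        inc * max 0 (min kc kf) := by simpa using hM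
    rw [hM']
    congr 1
    split_ifs <;> omega
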